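-- pv_equiv track=rewrite | github.com/codeuntilcold/asm1-intro-to-ai | problem.py | get_block_points
-- ===== SOURCE A (Python) =====
-- def get_block_points(board):
--     x_start, y_start, x_end, y_end, index_board_row, index_board_col = -1, -1, -1, -1, -1, -1
--     for rowBoard in board:
--         index_board_row += 1
--         for elementBoard in rowBoard:
--             index_board_col += 1
--
--             if elementBoard == "S":
--                 if x_start == -1:
--                     x_start = index_board_row
--                     y_start = index_board_col
--                 else:
--                     x_end = index_board_row
--                     y_end = index_board_col
--
--         index_board_col = -1
--
--     if x_end == -1:
--         x_end = x_start
--         y_end = y_start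
--
--     return x_start, y_start, x_end, y_end
-- ===== SOURCE B (Python) =====
-- def get_block_points(board):
--     positions = [(r, c) for r, row in enumerate(board) for c, el in enumerate(row) if el == "S"]
--     if not positions:
--         return -1, -1, -1, -1
--     x_start, y_start = positions[0]
--     x_end, y_end = positions[-1]
--     return x_start, y_start, x_end, y_end
-- ===== Notes on version B (the rewrite author's own statement) =====
-- stated objective: simpler
-- what changed: Replaces A's sentinel-tracking nested loops (manual row/column counters, first/last update branches, final patch-up of x_end) by a single comprehension collecting all 'S' coordinates and returning the first and last element of that list (all -1 when empty).
import Mathlib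
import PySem

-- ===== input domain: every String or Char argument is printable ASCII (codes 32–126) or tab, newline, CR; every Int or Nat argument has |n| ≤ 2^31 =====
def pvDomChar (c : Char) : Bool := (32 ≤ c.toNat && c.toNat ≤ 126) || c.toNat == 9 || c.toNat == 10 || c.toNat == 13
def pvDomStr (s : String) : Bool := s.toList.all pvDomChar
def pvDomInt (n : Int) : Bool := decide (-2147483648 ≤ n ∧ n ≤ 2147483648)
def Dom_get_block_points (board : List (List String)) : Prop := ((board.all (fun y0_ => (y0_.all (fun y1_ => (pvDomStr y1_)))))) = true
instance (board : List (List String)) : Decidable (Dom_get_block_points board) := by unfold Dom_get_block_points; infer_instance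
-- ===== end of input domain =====

-- B collects all 'S' coordinates in one comprehension and takes its first and last
-- element, instead of A's sentinel-tracking nested loops (objective: simpler).

-- ===== PORT A =====
-- inner loop body of A: state ((x_start, y_start, x_end, y_end), index_board_col)
def pvAInner (r : Int) (acc : (Int × Int × Int × Int) × Int) (el : String) :
    (Int × Int × Int × Int) × Int :=
  let c := acc.2 + 1
  let st := acc.1
  if el = "S" then
    if st.1 = -1 then ((r, c, st.2.2.1, st.2.2.2), c) else ((st.1, st.2.1, r, c), c)
  else (st, c)

-- outer loop body of A: state ((x_start, y_start, x_end, y_end), index_board_row)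
def pvAOuter (acc : (Int × Int × Int × Int) × Int) (row : List String) :
    (Int × Int × Int × Int) × Int :=
  let r := acc.2 + 1
  ((row.foldl (pvAInner r) (acc.1, -1)).1, r)

def get_block_points (board : List (List String)) : Int × Int × Int × Int :=
  let st := (board.foldl pvAOuter (((-1, -1, -1, -1) : Int × Int × Int × Int), (-1 : Int))).1
  if st.2.2.1 = -1 then (st.1, st.2.1, st.1, st.2.1) else st

-- ===== PORT B =====
def get_block_points_alt (board : List (List String)) : Int × Int × Int × Int :=
  let positions : List (Int × Int) :=
    (PySem.List.enumerate board 0).flatMap (fun rrow =>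
      (PySem.List.enumerate rrow.2 0).filterMap (fun cel =>
        if cel.2 = "S" then some (rrow.1, cel.1) else none))
  match positions with
  | [] => (-1, -1, -1, -1)
  | p :: rest =>
    let q := rest.getLastD p        -- positions[-1]
    (p.1, p.2, q.1, q.2)

-- ===== PRECONDITION & SPEC =====
def Spec_get_block_points (board : List (List String)) (out : Int × Int × Int × Int) : Prop := out = get_block_points_alt board
instance (board : List (List String)) (out : Int × Int × Int × Int) : Decidable (Spec_get_block_points board out) := by unfold Spec_get_block_points; infer_instance

-- ===== CLAIM (what is proved, stated in full; the proofs are below) =====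
def Claim_equal_get_block_points : Prop := ∀ (board : List (List String)), Dom_get_block_points board → Spec_get_block_points board (get_block_points board)

-- ===== LEMMAS AND PROOFS =====

-- the "S" positions of one row, columns counted from c
def pvPosRow (r c : Int) : List String → List (Int × Int)
  | [] => []
  | el :: rest => (if el = "S" then [(r, c)] else []) ++ pvPosRow r (c + 1) rest

-- the "S" positions of the board, rows counted from r
def pvPos (r : Int) : List (List String) → List (Int × Int)
  | [] => []
  | row :: rest => pvPosRow r 0 row ++ pvPos (r + 1) rest

-- the state transition A performs at one "S" cell
def pvStep (st : Int × Int × Int × Int) (p : Int × Int) : Int × Int × Int × Int :=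
  if st.1 = -1 then (p.1, p.2, st.2.2.1, st.2.2.2) else (st.1, st.2.1, p.1, p.2)

theorem pvAInner_run (r : Int) : ∀ (row : List String) (st : Int × Int × Int × Int) (c : Int),
    row.foldl (pvAInner r) (st, c) =
      ((pvPosRow r (c + 1) row).foldl pvStep st, c + row.length) := by
  intro row
  induction row with
  | nil => intro st c; simp [pvPosRow]
  | cons el rest ih =>
    intro st c
    rw [List.foldl_cons]
    by_cases h : el = "S"
    · by_cases h2 : st.1 = -1 <;>
        simp [pvAInner, pvPosRow, pvStep, h, h2, ih, Prod.ext_iff] <;> omega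
    · simp [pvAInner, pvPosRow, h, ih, Prod.ext_iff] <;> omega

theorem pvAOuter_run : ∀ (rows : List (List String)) (st : Int × Int × Int × Int) (r : Int),
    rows.foldl pvAOuter (st, r) =
      ((pvPos (r + 1) rows).foldl pvStep st, r + rows.length) := by
  intro rows
  induction rows with
  | nil => intro st r; simp [pvPos]
  | cons row rest ih =>
    intro st r
    rw [List.foldl_cons]
    show List.foldl pvAOuter ((row.foldl (pvAInner (r + 1)) (st, -1)).1, r + 1) rest = _
    rw [pvAInner_run, ih]
    simp [pvPos, Prod.ext_iff, show (-1 : Int) + 1 = 0 by norm_num] <;> omega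

theorem pvPosRow_fst (r : Int) : ∀ (row : List String) (c : Int) (p : Int × Int),
    p ∈ pvPosRow r c row → p.1 = r := by
  intro row
  induction row with
  | nil => simp [pvPosRow]
  | cons el rest ih =>
    intro c p hp
    simp only [pvPosRow, List.mem_append] at hp
    rcases hp with hp | hp
    · by_cases h : el = "S" <;> simp [h] at hp
      subst hp; rfl
    · exact ih _ _ hp

theorem pvPos_fst_nonneg : ∀ (rows : List (List String)) (r : Int), 0 ≤ r →
    ∀ p ∈ pvPos r rows, 0 ≤ p.1 := by
  intro rows
  induction rows with
  | nil => simp [pvPos]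
  | cons row rest ih =>
    intro r hr p hp
    simp only [pvPos, List.mem_append] at hp
    rcases hp with hp | hp
    · rw [pvPosRow_fst r row 0 p hp]; exact hr
    · exact ih (r + 1) (by omega) p hp

-- B's comprehension computes exactly pvPos
theorem pvRow_eq (r : Int) : ∀ (row : List String) (c : Int),
    (PySem.List.enumerate row c).filterMap (fun cel =>
        if cel.2 = "S" then some (r, cel.1) else none) = pvPosRow r c row := by
  intro row
  induction row with
  | nil => intro c; simp [PySem.List.enumerate_nil, pvPosRow]
  | cons el rest ih =>
    intro c
    rw [PySem.List.enumerate_cons]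
    by_cases h : el = "S" <;> simp [h, pvPosRow, ih]

theorem pvBoard_eq : ∀ (rows : List (List String)) (r : Int),
    (PySem.List.enumerate rows r).flatMap (fun rrow =>
      (PySem.List.enumerate rrow.2 0).filterMap (fun cel =>
        if cel.2 = "S" then some (rrow.1, cel.1) else none)) = pvPos r rows := by
  intro rows
  induction rows with
  | nil => intro r; simp [PySem.List.enumerate_nil, pvPos]
  | cons row rest ih =>
    intro r
    rw [PySem.List.enumerate_cons]
    simp only [List.flatMap_cons, pvPos]
    rw [ih, pvRow_eq]

-- running pvStep from a state whose x_start ≠ -1 keeps start and sets end to the last position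
theorem pvStep_run : ∀ (P : List (Int × Int)) (xs ys xe ye : Int), xs ≠ -1 →
    P.foldl pvStep (xs, ys, xe, ye) =
      (xs, ys, (P.getLastD (xe, ye)).1, (P.getLastD (xe, ye)).2) := by
  intro P
  induction P with
  | nil => intro xs ys xe ye h; simp
  | cons p rest ih =>
    intro xs ys xe ye h
    simp only [List.foldl_cons, pvStep, if_neg h, List.getLastD_cons]
    exact ih xs ys p.1 p.2 h

-- ===== VERDICT (by name: the statement is the Claim_ definition above) =====
theorem get_block_points_spec : Claim_equal_get_block_points := by
  intro board _
  unfold Spec_get_block_points get_block_points get_block_points_alt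
  rw [pvBoard_eq]
  rw [pvAOuter_run]
  simp only [show (-1 : Int) + 1 = 0 by norm_num]
  have hpos := pvPos_fst_nonneg board 0 le_rfl
  cases hP : pvPos 0 board with
  | nil => simp
  | cons p rest =>
    have hp1 : p.1 ≠ -1 := by
      have := hpos p (by rw [hP]; exact List.mem_cons_self ..)
      omega
    have hstep : pvStep (-1, -1, -1, -1) p = (p.1, p.2, -1, -1) := by simp [pvStep]
    rw [List.foldl_cons, hstep, pvStep_run rest p.1 p.2 (-1) (-1) hp1]
    cases rest with
    | nil => simp
    | cons q rest' =>
      have hmem : rest'.getLastD q ∈ pvPos 0 board := by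
        rw [hP]
        exact List.mem_cons_of_mem _ List.getLastD_mem_cons
      have h1 : (rest'.getLastD q).1 ≠ -1 := by
        have := hpos _ hmem
        omega
      rw [List.getLastD_cons]
      split_ifs with hc
      · exact absurd hc h1
      · show (p.1, p.2, (rest'.getLastD q).1, (rest'.getLastD q).2) =
          (p.1, p.2, ((q :: rest').getLastD p).1, ((q :: rest').getLastD p).2)
        rw [List.getLastD_cons]
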